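-- pv_equiv track=rewrite | github.com/evanwht/advent_2019 | day_7.py | get_phases
-- ===== SOURCE A (Python) =====
-- def get_phases(lower, upper):
-- 	phases = []
-- 	for i in range(lower, upper):
-- 		for j in range(lower, upper):
-- 			for k in range(lower, upper):
-- 				for h in range(lower, upper):
-- 					for m in range(lower, upper):
-- 						if i != j and i != k and i != h and i != m and j != k and j != h and j != m and k != h and k != m and h != m:
-- 							phases.append([i, j, k, h, m])
-- 	return phases
-- ===== SOURCE B (Python) =====
-- def get_phases(lower, upper):
--     out = []
--     def go(k, xs, pre):
--         if k == 2:
--             out.extend([pre + [x, y] for x in xs for y in xs if y != x])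
--             return
--         for i in range(len(xs)):
--             go(k - 1, xs[:i] + xs[i + 1:], pre + [xs[i]])
--     go(5, list(range(lower, upper)), [])
--     return out
-- ===== Notes on version B (the rewrite author's own statement) =====
-- stated objective: alternative
-- what changed: Replaced the five nested range loops with a 10-way distinctness filter by a recursive pick-and-remove DFS over shrinking candidate lists that only visits distinct selections, emitting ordered distinct pairs at the base, in the same lexicographic order.
import Mathlib
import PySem

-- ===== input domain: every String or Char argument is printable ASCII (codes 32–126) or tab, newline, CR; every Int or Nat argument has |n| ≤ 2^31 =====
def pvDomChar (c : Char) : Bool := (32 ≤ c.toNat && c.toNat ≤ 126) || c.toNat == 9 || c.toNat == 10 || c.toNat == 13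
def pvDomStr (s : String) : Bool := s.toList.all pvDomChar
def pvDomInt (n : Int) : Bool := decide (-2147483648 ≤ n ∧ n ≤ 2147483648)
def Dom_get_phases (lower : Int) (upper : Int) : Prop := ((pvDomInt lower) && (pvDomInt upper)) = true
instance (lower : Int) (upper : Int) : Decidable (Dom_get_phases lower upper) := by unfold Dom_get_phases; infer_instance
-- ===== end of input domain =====

-- B replaces A's five nested range-loops with a 10-way distinctness filter by a recursive
-- pick-and-remove DFS over shrinking candidate lists (different algorithm, same output).


-- ===== PORT A =====
def get_phases (lower : Int) (upper : Int) : List (List Int) :=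
  (PySem.List.pyRange lower upper 1).foldl (fun phases i =>
    (PySem.List.pyRange lower upper 1).foldl (fun phases j =>
      (PySem.List.pyRange lower upper 1).foldl (fun phases k =>
        (PySem.List.pyRange lower upper 1).foldl (fun phases h =>
          (PySem.List.pyRange lower upper 1).foldl (fun phases m =>
            if i ≠ j ∧ i ≠ k ∧ i ≠ h ∧ i ≠ m ∧ j ≠ k ∧ j ≠ h ∧ j ≠ m ∧ k ≠ h ∧ k ≠ m ∧ h ≠ m then
              phases ++ [[i, j, k, h, m]]
            else phases) phases) phases) phases) phases) []

-- ===== PORT B =====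
-- Source B's go(k, xs, pre): DFS that picks xs[i], recurses on xs[:i] + xs[i+1:] with prefix
-- pre + [xs[i]]; at k == 2 it emits pre + [x, y] for the ordered distinct pairs.
-- out.extend in DFS order is ported as list concatenation.
def goB : Nat → List Int → List Int → List (List Int)
  | 0, _, _ => []         -- unreachable: go is only ever called with k ≥ 2
  | 1, _, _ => []         -- unreachable: go is only ever called with k ≥ 2
  | 2, xs, pre => xs.flatMap (fun x => (xs.filter (fun y => y != x)).map (fun y => pre ++ [x, y]))
  | k + 3, xs, pre =>
    (List.range xs.length).flatMap
      (fun i => goB (k + 2) (xs.take i ++ xs.drop (i + 1)) (pre ++ [xs.getD i 0]))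

def get_phases_alt (lower : Int) (upper : Int) : List (List Int) :=
  goB 5 (PySem.List.pyRange lower upper 1) []

-- ===== PRECONDITION & SPEC =====
def Spec_get_phases (lower : Int) (upper : Int) (out : List (List Int)) : Prop := out = get_phases_alt lower upper
instance (lower : Int) (upper : Int) (out : List (List Int)) : Decidable (Spec_get_phases lower upper out) := by unfold Spec_get_phases; infer_instance

-- ===== CLAIM (what is proved, stated in full; the proofs are below) =====
def Claim_equal_get_phases : Prop := ∀ (lower : Int) (upper : Int), Dom_get_phases lower upper → Spec_get_phases lower upper (get_phases lower upper)

-- ===== LEMMAS AND PROOFS =====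

-- canonical recursive permutation generator used by the proofs
def sel : Nat → List Int → List (List Int)
  | 0, _ => [[]]
  | n + 1, xs => xs.flatMap (fun x => (sel n (xs.erase x)).map (fun p => x :: p))

-- A's nested loops, generalized: n remaining levels, acc = choices so far (reversed)
def nestA (R : List Int) : Nat → List Int → List (List Int)
  | 0, acc => if acc.reverse.Nodup then [acc.reverse] else []
  | n + 1, acc => R.flatMap (fun x => nestA R n (x :: acc))

theorem flatMap_congr_mem' {α β : Type} (l : List α) {f g : α → List β}
    (h : ∀ x ∈ l, f x = g x) : l.flatMap f = l.flatMap g := by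
  induction l with
  | nil => rfl
  | cons a t ih =>
    simp only [List.flatMap_cons, h a (List.mem_cons_self),
      ih (fun x hx => h x (List.mem_cons_of_mem a hx))]

theorem flatMap_filter' {α β : Type} (p : α → Bool) (g : α → List β) (l : List α) :
    (l.filter p).flatMap g = l.flatMap (fun x => if p x then g x else []) := by
  induction l with
  | nil => rfl
  | cons a t ih => by_cases h : p a <;> simp [h, ih]

theorem flatMap_const_nil {α β : Type} (l : List α) :
    l.flatMap (fun _ => ([] : List β)) = [] := by
  induction l with
  | nil => rfl
  | cons a t ih => simp [ih]

theorem flatMap_ite_singleton {α β : Type} (p : α → Prop) [DecidablePred p]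
    (f : α → β) (l : List α) :
    l.flatMap (fun x => if p x then [f x] else []) =
      (l.filter (fun x => decide (p x))).map f := by
  induction l with
  | nil => rfl
  | cons a t ih => by_cases h : p a <;> simp [h, ih]

-- '(range (len xs)).flatMap over xs[:i]+xs[i+1:]' is 'xs.flatMap over xs.erase x' on nodup xs
theorem rangeSel : ∀ (xs : List Int), xs.Nodup →
    ∀ (F : Int → List Int → List (List Int)),
      (List.range xs.length).flatMap
        (fun idx => F (xs.getD idx 0) (xs.take idx ++ xs.drop (idx + 1))) =
      xs.flatMap (fun x => F x (xs.erase x)) := by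
  intro xs
  induction xs with
  | nil => intro _ F; rfl
  | cons a t ih =>
    intro h F
    have ha : a ∉ t := (List.nodup_cons.mp h).1
    have ht : t.Nodup := (List.nodup_cons.mp h).2
    rw [List.length_cons, List.range_succ_eq_map, List.flatMap_cons, List.flatMap_map]
    simp only [List.getD_cons_zero, List.getD_cons_succ, List.take_zero, List.take_succ_cons,
      List.drop_succ_cons, List.drop_zero, List.nil_append, List.cons_append]
    rw [ih ht (fun x r => F x (a :: r))]
    rw [List.flatMap_cons, List.erase_cons_head]
    congr 1
    refine flatMap_congr_mem' t (fun x hx => ?_)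
    have hax : a ≠ x := fun e => ha (e ▸ hx)
    rw [List.erase_cons_tail (by simpa using hax)]

theorem sel_one (l : List Int) : sel 1 l = l.map (fun y => [y]) := by
  rw [show sel 1 l = l.flatMap (fun y => [[y]]) from rfl]
  induction l with
  | nil => rfl
  | cons a t ih => simp [ih]

theorem sel_two (xs : List Int) (h : xs.Nodup) :
    sel 2 xs = xs.flatMap (fun x => (xs.filter (fun y => y != x)).map (fun y => [x, y])) := by
  rw [show sel 2 xs = xs.flatMap (fun x => (sel 1 (xs.erase x)).map (fun p => x :: p)) from rfl]
  refine flatMap_congr_mem' xs (fun x hx => ?_)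
  rw [sel_one, List.map_map, List.Nodup.erase_eq_filter h]
  rfl

theorem goB_eq_sel : ∀ (k : Nat) (xs pre : List Int), xs.Nodup →
    goB (k + 2) xs pre = (sel (k + 2) xs).map (fun q => pre ++ q) := by
  intro k
  induction k with
  | zero =>
    intro xs pre h
    rw [show goB 2 xs pre =
        xs.flatMap (fun x => (xs.filter (fun y => y != x)).map (fun y => pre ++ [x, y])) from rfl]
    rw [sel_two xs h, List.map_flatMap]
    refine flatMap_congr_mem' xs (fun x _ => ?_)
    rw [List.map_map]
    rfl
  | succ k ih =>
    intro xs pre h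
    rw [show goB (k + 3) xs pre =
        (List.range xs.length).flatMap
          (fun i => goB (k + 2) (xs.take i ++ xs.drop (i + 1)) (pre ++ [xs.getD i 0])) from rfl]
    rw [rangeSel xs h (fun x r => goB (k + 2) r (pre ++ [x]))]
    rw [show sel (k + 3) xs =
        xs.flatMap (fun x => (sel (k + 2) (xs.erase x)).map (fun p => x :: p)) from rfl,
      List.map_flatMap]
    refine flatMap_congr_mem' xs (fun x _ => ?_)
    rw [ih _ _ (h.erase x), List.map_map]
    simp [List.append_assoc]

theorem nestA_main (R : List Int) (hR : R.Nodup) :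
    ∀ (n : Nat) (acc : List Int),
      nestA R n acc =
        if acc.Nodup then
          (sel n (R.filter (fun y => y ∉ acc))).map (fun p => acc.reverse ++ p)
        else [] := by
  intro n
  induction n with
  | zero =>
    intro acc
    rw [nestA, sel]
    by_cases h : acc.Nodup
    · rw [if_pos (List.nodup_reverse.mpr h), if_pos h]; simp
    · rw [if_neg (fun hp => h (List.nodup_reverse.mp hp)), if_neg h]
  | succ n ih =>
    intro acc
    rw [nestA]
    simp only [ih]
    by_cases hacc : acc.Nodup
    · rw [if_pos hacc, sel, List.map_flatMap, flatMap_filter']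
      refine flatMap_congr_mem' R (fun x _ => ?_)
      by_cases hxa : x ∈ acc
      · rw [if_neg (by simp [List.nodup_cons, hxa]), if_neg (by simp [hxa])]
      · rw [if_pos (List.nodup_cons.mpr ⟨hxa, hacc⟩), if_pos (by simp [hxa])]
        have herase : (R.filter (fun y => y ∉ acc)).erase x =
            R.filter (fun y => y ∉ x :: acc) := by
          rw [List.Nodup.erase_eq_filter (hR.filter _), List.filter_filter]
          refine List.filter_congr (fun y _ => ?_)
          have hbeq : (y == x) = decide (y = x) := by by_cases h : y = x <;> simp [h]
          simp [List.mem_cons, not_or, bne, hbeq]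
        rw [herase, List.map_map]
        simp [List.reverse_cons, List.append_assoc]
    · rw [if_neg hacc]
      have hx : ∀ x : Int, ¬ (x :: acc).Nodup := fun x hn => hacc (List.nodup_cons.mp hn).2
      simp only [if_neg (hx _)]
      exact flatMap_const_nil R

theorem get_phases_eq_nestA (lower upper : Int) :
    get_phases lower upper = nestA (PySem.List.pyRange lower upper 1) 5 [] := by
  have e5 : ∀ acc, nestA (PySem.List.pyRange lower upper 1) 5 acc =
      (PySem.List.pyRange lower upper 1).flatMap
        (fun x => nestA (PySem.List.pyRange lower upper 1) 4 (x :: acc)) := fun _ => rfl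
  have e4 : ∀ acc, nestA (PySem.List.pyRange lower upper 1) 4 acc =
      (PySem.List.pyRange lower upper 1).flatMap
        (fun x => nestA (PySem.List.pyRange lower upper 1) 3 (x :: acc)) := fun _ => rfl
  have e3 : ∀ acc, nestA (PySem.List.pyRange lower upper 1) 3 acc =
      (PySem.List.pyRange lower upper 1).flatMap
        (fun x => nestA (PySem.List.pyRange lower upper 1) 2 (x :: acc)) := fun _ => rfl
  have e2 : ∀ acc, nestA (PySem.List.pyRange lower upper 1) 2 acc =
      (PySem.List.pyRange lower upper 1).flatMap
        (fun x => nestA (PySem.List.pyRange lower upper 1) 1 (x :: acc)) := fun _ => rfl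
  have e1 : ∀ acc, nestA (PySem.List.pyRange lower upper 1) 1 acc =
      (PySem.List.pyRange lower upper 1).flatMap
        (fun x => nestA (PySem.List.pyRange lower upper 1) 0 (x :: acc)) := fun _ => rfl
  have e0 : ∀ acc : List Int, nestA (PySem.List.pyRange lower upper 1) 0 acc =
      if acc.reverse.Nodup then [acc.reverse] else [] := fun _ => rfl
  rw [e5]
  simp only [e4, e3, e2, e1, e0, List.reverse_cons, List.reverse_nil, List.nil_append,
    List.cons_append]
  simp only [flatMap_ite_singleton (fun m => List.Nodup _) _ _]
  unfold get_phases
  simp only [PySem.List.foldl_append_ite, PySem.List.foldl_append_eq_flatMap, List.nil_append]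
  refine flatMap_congr_mem' _ (fun i _ => ?_)
  refine flatMap_congr_mem' _ (fun j _ => ?_)
  refine flatMap_congr_mem' _ (fun k _ => ?_)
  refine flatMap_congr_mem' _ (fun h _ => ?_)
  have hc : (fun m : Int => decide (i ≠ j ∧ i ≠ k ∧ i ≠ h ∧ i ≠ m ∧ j ≠ k ∧ j ≠ h ∧ j ≠ m ∧
      k ≠ h ∧ k ≠ m ∧ h ≠ m)) = (fun m : Int => decide (List.Nodup [i, j, k, h, m])) := by
    funext m
    rw [decide_eq_decide]
    constructor
    · rintro ⟨h1, h2, h3, h4, h5, h6, h7, h8, h9, h10⟩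
      simp [List.nodup_cons, List.mem_cons, not_or]
      tauto
    · intro hn
      simp [List.nodup_cons, List.mem_cons, not_or] at hn
      tauto
  rw [hc]

-- ===== VERDICT (by name: the statement is the Claim_ definition above) =====
theorem get_phases_spec : Claim_equal_get_phases := by
  intro lower upper _
  unfold Spec_get_phases
  have hR := PySem.List.nodup_pyRange_one lower upper
  have hB : get_phases_alt lower upper = sel 5 (PySem.List.pyRange lower upper 1) := by
    rw [show get_phases_alt lower upper =
        goB (3 + 2) (PySem.List.pyRange lower upper 1) [] from rfl, goB_eq_sel 3 _ [] hR]
    simp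
  rw [get_phases_eq_nestA, nestA_main _ hR, hB]
  simp
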